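-- pv_equiv track=rewrite | github.com/ExIntercept/ShiftEncrypter | encrypter.py | shiftMatrix
-- ===== SOURCE A (Python) =====
-- def shiftMatrix(matrix):
--     shifted_matrix = []
--     num_rows = len(matrix)
--     num_cols = len(matrix[0])
--
--     for col in range(num_cols):
--         shifted_col = []
--         for row in range(num_rows):
--             # Calculate the shifted index for the current column
--             shifted_index = (col + row) % num_cols
--             # Append the element at the shifted index in the current column
--             shifted_col.append(matrix[row][shifted_index])
--         # Append the shifted column to the shifted matrix
--         shifted_matrix.append(shifted_col)
--     return shifted_matrix
-- ===== SOURCE B (Python) =====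
-- def shiftMatrix(matrix):
--     num_cols = len(matrix[0])
--     if num_cols == 0:
--         return []
--     rotated = []
--     for i, row in enumerate(matrix):
--         k = i % num_cols
--         base = row[:num_cols]
--         rotated.append(base[k:] + base[:k])
--     return [list(col) for col in zip(*rotated)]
-- ===== Notes on version B (the rewrite author's own statement) =====
-- stated objective: alternative
-- what changed: Replaces the nested index-arithmetic gather loop with a two-phase rotate-then-transpose: each row is left-rotated by its index and the result is transposed with zip(*...).
import Mathlib
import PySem

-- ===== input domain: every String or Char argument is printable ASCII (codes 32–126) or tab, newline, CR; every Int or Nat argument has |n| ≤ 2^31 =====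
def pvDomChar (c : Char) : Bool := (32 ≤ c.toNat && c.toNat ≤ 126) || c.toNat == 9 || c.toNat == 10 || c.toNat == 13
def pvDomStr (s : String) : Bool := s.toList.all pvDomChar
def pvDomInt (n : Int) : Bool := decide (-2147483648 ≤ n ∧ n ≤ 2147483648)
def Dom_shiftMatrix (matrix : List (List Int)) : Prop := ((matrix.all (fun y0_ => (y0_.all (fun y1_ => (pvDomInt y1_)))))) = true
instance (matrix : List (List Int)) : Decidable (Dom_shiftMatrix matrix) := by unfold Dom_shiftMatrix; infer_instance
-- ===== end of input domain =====

-- B replaces the nested index-arithmetic gather with a rotate-each-row-then-transpose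
-- two-phase computation (objective: alternative decomposition, same cost).

-- ===== PORT A =====
-- Literal port of A: nested for-loops over range(num_cols) / range(num_rows),
-- appending to accumulator lists.  All indices are nonnegative, so Nat `%` agrees
-- with Python's `%`; the getD defaults are only reached outside Pre_ (where the
-- Python raises IndexError).
def shiftMatrix (matrix : List (List Int)) : List (List Int) :=
  let num_rows := matrix.length
  let num_cols := (matrix.headD []).length
  (List.range num_cols).foldl (fun shifted_matrix col =>
    shifted_matrix ++ [(List.range num_rows).foldl (fun shifted_col row =>
      shifted_col ++ [(matrix.getD row []).getD ((col + row) % num_cols) 0]) []]) []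

-- ===== PORT B =====
-- rotRow n i row = (row[:n])[i%n:] + (row[:n])[:i%n]
def rotRow (n i : Nat) (row : List Int) : List Int :=
  let k := i % n
  let base := row.take n
  base.drop k ++ base.take k

-- zip(*rows) : collect heads while every row is nonempty (Python zip truncation).
def zipStar (rows : List (List Int)) : List (List Int) :=
  if h : rows ≠ [] ∧ rows.all (fun r => !r.isEmpty) then
    (rows.map (fun r => r.headD 0)) :: zipStar (rows.map (fun r => r.tail))
  else []
termination_by (rows.headD []).length
decreasing_by
  obtain ⟨h1, h2⟩ := h
  cases rows with
  | nil => simp at h1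
  | cons r rs =>
    simp only [List.all_cons, Bool.and_eq_true, Bool.not_eq_true'] at h2
    cases r with
    | nil => simp at h2
    | cons a as => simp

def shiftMatrix_alt (matrix : List (List Int)) : List (List Int) :=
  let n := (matrix.headD []).length
  if n = 0 then []
  else zipStar (matrix.mapIdx (fun i row => rotRow n i row))

-- ===== PRECONDITION & SPEC =====
-- Pre_ is exactly where Python A returns: a nonempty matrix whose every row is at
-- least as long as the first (otherwise A raises IndexError).
def Pre_shiftMatrix (matrix : List (List Int)) : Prop :=
  matrix ≠ [] ∧ ∀ r ∈ matrix, (matrix.headD []).length ≤ r.length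
instance (matrix : List (List Int)) : Decidable (Pre_shiftMatrix matrix) := by
  unfold Pre_shiftMatrix; infer_instance

def pvWitness_shiftMatrix : List (List Int) := [[1, 2], [3, 4]]

def Spec_shiftMatrix (matrix : List (List Int)) (out : List (List Int)) : Prop := out = shiftMatrix_alt matrix
instance (matrix : List (List Int)) (out : List (List Int)) : Decidable (Spec_shiftMatrix matrix out) := by unfold Spec_shiftMatrix; infer_instance

-- ===== CLAIM (what is proved, stated in full; the proofs are below) =====
def Claim_equal_shiftMatrix : Prop := ∀ (matrix : List (List Int)), Dom_shiftMatrix matrix → Pre_shiftMatrix matrix → Spec_shiftMatrix matrix (shiftMatrix matrix)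

-- ===== LEMMAS AND PROOFS =====

-- append-accumulator foldl is a map
lemma foldl_push {α β : Type} (f : α → β) (l : List α) (acc : List β) :
    l.foldl (fun a x => a ++ [f x]) acc = acc ++ l.map f := by
  induction l generalizing acc with
  | nil => simp
  | cons x xs ih => simp [ih]

lemma getD_zero_eq_headD (l : List Int) : l.headD 0 = l.getD 0 0 := by
  cases l <;> simp [List.getD]

lemma tail_getD (l : List Int) (c : Nat) : l.tail.getD c 0 = l.getD (c + 1) 0 := by
  cases l <;> simp [List.getD]

-- zipStar on a nonempty family of rows all of length n is the column map
lemma zipStar_eq (n : Nat) (rows : List (List Int)) (hne : rows ≠ [])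
    (hlen : ∀ r ∈ rows, r.length = n) :
    zipStar rows = (List.range n).map (fun c => rows.map (fun r => r.getD c 0)) := by
  induction n generalizing rows with
  | zero =>
    rw [zipStar, dif_neg]
    · simp
    · rintro ⟨-, hall⟩
      cases rows with
      | nil => exact hne rfl
      | cons r rs =>
        have := hlen r (by simp)
        simp only [List.all_cons, Bool.and_eq_true, Bool.not_eq_true'] at hall
        simp [List.isEmpty_iff, List.eq_nil_of_length_eq_zero this] at hall
  | succ m ih =>
    have hall : rows.all (fun r => !r.isEmpty) = true := by
      rw [List.all_eq_true]
      intro r hr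
      have := hlen r hr
      simp [List.isEmpty_iff]
      intro h; rw [h] at this; simp at this
    rw [zipStar, dif_pos ⟨hne, hall⟩]
    have ht : (rows.map (fun r => r.tail)) ≠ [] := by simpa using hne
    have hlt : ∀ r ∈ rows.map (fun r => r.tail), r.length = m := by
      intro r hr
      obtain ⟨s, hs, rfl⟩ := List.mem_map.mp hr
      have := hlen s hs
      simp [List.length_tail, this]
    rw [ih _ ht hlt, List.range_succ_eq_map]
    simp only [List.map_cons, List.map_map]
    congr 1
    · exact List.map_congr_left (fun r _ => getD_zero_eq_headD r)
    · apply List.map_congr_left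
      intro c _
      simp only [Function.comp_apply, Function.comp_def, List.map_map, Nat.succ_eq_add_one]
      exact (List.map_congr_left (fun r _ => tail_getD r c))

lemma rotRow_length (n i : Nat) (row : List Int) (hn : 0 < n) (hl : n ≤ row.length) :
    (rotRow n i row).length = n := by
  have hk : i % n < n := Nat.mod_lt _ hn
  simp [rotRow, List.length_drop, List.length_take]
  omega

lemma rotRow_getD (n i c : Nat) (row : List Int) (hn : 0 < n) (hl : n ≤ row.length)
    (hc : c < n) : (rotRow n i row).getD c 0 = row.getD ((c + i) % n) 0 := by
  have hk : i % n < n := Nat.mod_lt _ hn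
  have hbase : (row.take n).length = n := by simp; omega
  have hmod : (c + i) % n = (c + i % n) % n := by
    conv_lhs => rw [Nat.add_mod]
    conv_rhs => rw [Nat.add_mod]
    simp
  set k := i % n with hkdef
  simp only [rotRow, List.getD_eq_getElem?_getD]
  by_cases hcase : c < n - k
  · rw [List.getElem?_append_left (by simp [hbase]; omega)]
    rw [List.getElem?_drop]
    have : (row.take n)[k + c]? = row[k + c]? := by
      rw [List.getElem?_take_of_lt (by omega)]
    rw [this, hmod]
    have : (c + k) % n = k + c := by rw [Nat.mod_eq_of_lt (by omega)]; omega
    rw [this]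
  · rw [List.getElem?_append_right (by simp [hbase]; omega)]
    have hidx : c - (List.drop k (row.take n)).length = c - (n - k) := by simp [hbase]
    rw [hidx]
    have h1 : (List.take k (row.take n))[c - (n - k)]? = (row.take n)[c - (n-k)]? := by
      rw [List.getElem?_take_of_lt (by omega)]
    have h2 : (row.take n)[c - (n-k)]? = row[c - (n-k)]? := by
      rw [List.getElem?_take_of_lt (by omega)]
    rw [h1, h2, hmod]
    have : (c + k) % n = c - (n - k) := by
      have h3 : c + k - n < n := by omega
      rw [Nat.mod_eq_sub_mod (by omega), Nat.mod_eq_of_lt h3]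
      omega
    rw [this]

lemma map_eq_map_range {β : Type} (g : List Int → β) (l : List (List Int)) :
    l.map g = (List.range l.length).map (fun i => g (l.getD i [])) := by
  apply List.ext_getElem
  · simp
  · intro i h1 h2
    simp only [List.getElem_map, List.getElem_range]
    congr 1
    rw [List.getD_eq_getElem?_getD, List.getElem?_eq_getElem (by simpa using h2)]
    rfl

lemma mapIdx_getD (f : Nat → List Int → List Int) (l : List (List Int)) (i : Nat)
    (h : i < l.length) : (l.mapIdx f).getD i [] = f i (l.getD i []) := by
  rw [List.getD_eq_getElem?_getD, List.getD_eq_getElem?_getD,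
    List.getElem?_eq_getElem (by simpa using h), List.getElem?_eq_getElem h]
  simp

-- ===== VERDICT (by name: the statement is the Claim_ definition above) =====
theorem shiftMatrix_spec : Claim_equal_shiftMatrix := by
  intro matrix _ hpre
  obtain ⟨hne, hrows⟩ := hpre
  unfold Spec_shiftMatrix shiftMatrix shiftMatrix_alt
  simp only []
  set n := (matrix.headD []).length with hn
  by_cases h0 : n = 0
  · simp [h0]
  · rw [if_neg h0]
    have hnpos : 0 < n := Nat.pos_of_ne_zero h0
    set rows := matrix.mapIdx (fun i row => rotRow n i row) with hrowsdef
    have hmne : rows ≠ [] := by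
      simp [hrowsdef]
      intro h; exact hne h
    have hml : ∀ r ∈ rows, r.length = n := by
      intro r hr
      rw [hrowsdef, List.mem_mapIdx] at hr
      obtain ⟨i, hi, rfl⟩ := hr
      exact rotRow_length n i _ hnpos (hrows _ (List.getElem_mem hi))
    rw [zipStar_eq n rows hmne hml]
    rw [foldl_push (fun col => (List.range matrix.length).foldl
      (fun shifted_col row => shifted_col ++ [(matrix.getD row []).getD ((col + row) % n) 0]) [])]
    simp only [List.nil_append]
    apply List.map_congr_left
    intro c hc
    rw [foldl_push (fun row => (matrix.getD row []).getD ((c + row) % n) 0)]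
    simp only [List.nil_append]
    rw [map_eq_map_range (fun r => r.getD c 0) rows]
    have hlen : rows.length = matrix.length := by simp [hrowsdef]
    rw [hlen]
    apply List.map_congr_left
    intro row hrow
    rw [List.mem_range] at hrow hc
    rw [hrowsdef, mapIdx_getD _ _ _ hrow]
    exact (rotRow_getD n row c (matrix.getD row []) hnpos
      (hrows _ (by rw [List.getD_eq_getElem?_getD, List.getElem?_eq_getElem hrow]; exact List.getElem_mem hrow)) hc).symm
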